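-- pv_equiv track=rewrite | github.com/laurjones/motif-mark | motif-mark2.WORKS.py | motif_to_regex
-- ===== SOURCE A (Python) =====
-- def motif_to_regex(motif:str) -> str:
--     '''A funtion to return nucleotides correct nucletoides in motifs corresponding to the IUPAC dict.'''
--     # eg motif= "ycgy", motif_regex = "[CT]cg[CT]"
--     # Using IUPAC dict
--     iupac_dict = {
--         "Y": "[CT]",
--         "R": "[AG]",
--         "S": "[GC]",
--         "W": "[AT]",
--         "K": "[GT]",
--         "M": "[AC]",
--         "B": "[CGT]",
--         "D": "[AGT]",
--         "H": "[ACT]",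
--         "V": "[ACG]",
--         "N": "[ATCG]",
--         "U": "[UT]",
--     }
--
--     # Replacing motifs with corresponding regex patterns
--
--     regex_motif = motif.upper()
--     for nucleotide, motif in iupac_dict.items():
--         regex_motif = regex_motif.replace(nucleotide, motif)
--
--     return regex_motif
-- ===== SOURCE B (Python) =====
-- def motif_to_regex(motif: str) -> str:
--     '''A funtion to return nucleotides correct nucletoides in motifs corresponding to the IUPAC dict.'''
--     def expand(c):
--         if c == "Y":
--             return "[CT]"
--         elif c == "R":
--             return "[AG]"
--         elif c == "S":
--             return "[GC]"
--         elif c == "W":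
--             return "[AT]"
--         elif c == "K":
--             return "[GT]"
--         elif c == "M":
--             return "[AC]"
--         elif c == "B":
--             return "[CGT]"
--         elif c == "D":
--             return "[AGT]"
--         elif c == "H":
--             return "[ACT]"
--         elif c == "V":
--             return "[ACG]"
--         elif c == "N":
--             return "[ATCG]"
--         elif c == "U":
--             return "[UT]"
--         else:
--             return c
--     out = []
--     for c in motif.upper():
--         out.append(expand(c))
--     return "".join(out)
-- ===== Notes on version B (the rewrite author's own statement) =====
-- stated objective: simpler
-- what changed: Replaces the twelve sequential full-string .replace passes over the whole string with a single left-to-right loop that expands each character through a per-character if/elif chain (identity fallback) and joins the pieces.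
import Mathlib
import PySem

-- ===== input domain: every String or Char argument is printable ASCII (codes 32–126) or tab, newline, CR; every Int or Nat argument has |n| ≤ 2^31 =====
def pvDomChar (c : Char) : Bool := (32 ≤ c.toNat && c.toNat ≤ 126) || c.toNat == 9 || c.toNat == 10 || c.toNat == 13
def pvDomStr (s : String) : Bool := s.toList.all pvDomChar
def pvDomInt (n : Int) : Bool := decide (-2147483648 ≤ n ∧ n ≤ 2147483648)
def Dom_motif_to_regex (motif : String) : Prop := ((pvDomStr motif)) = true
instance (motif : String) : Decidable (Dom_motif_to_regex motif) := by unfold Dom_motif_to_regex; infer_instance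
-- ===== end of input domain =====

-- B replaces A's twelve sequential full-string replace passes with one loop that expands each
-- character through an if/elif chain (identity fallback) and joins — simpler, same result.


-- ===== PORT A =====
-- A's iupac_dict (a Python dict, iterated over its items in insertion order)
def iupacDictA : PySem.Dict String String := PySem.Dict.ofList
  [("Y", "[CT]"), ("R", "[AG]"), ("S", "[GC]"), ("W", "[AT]"), ("K", "[GT]"), ("M", "[AC]"),
   ("B", "[CGT]"), ("D", "[AGT]"), ("H", "[ACT]"), ("V", "[ACG]"), ("N", "[ATCG]"), ("U", "[UT]")]

def motif_to_regex (motif : String) : String :=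
  iupacDictA.items.foldl (fun regex_motif p => PySem.Str.replace regex_motif p.1 p.2)
    (PySem.Str.upper motif)

-- ===== PORT B =====
-- B's inner helper expand(c): an if/elif chain with identity fallback
def pvExpand (c : Char) : String :=
  if c = 'Y' then "[CT]"
  else if c = 'R' then "[AG]"
  else if c = 'S' then "[GC]"
  else if c = 'W' then "[AT]"
  else if c = 'K' then "[GT]"
  else if c = 'M' then "[AC]"
  else if c = 'B' then "[CGT]"
  else if c = 'D' then "[AGT]"
  else if c = 'H' then "[ACT]"
  else if c = 'V' then "[ACG]"
  else if c = 'N' then "[ATCG]"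
  else if c = 'U' then "[UT]"
  else String.ofList [c]

-- B's loop: out starts empty, each character appends expand(c); finally "".join(out)
def motif_to_regex_alt (motif : String) : String :=
  PySem.Str.join ""
    ((PySem.Str.upper motif).toList.foldl (fun out c => out ++ [pvExpand c]) [])

-- ===== PRECONDITION & SPEC =====
def Spec_motif_to_regex (motif : String) (out : String) : Prop := out = motif_to_regex_alt motif
instance (motif : String) (out : String) : Decidable (Spec_motif_to_regex motif out) := by unfold Spec_motif_to_regex; infer_instance

-- ===== CLAIM (what is proved, stated in full; the proofs are below) =====
def Claim_equal_motif_to_regex : Prop := ∀ (motif : String), Dom_motif_to_regex motif → Spec_motif_to_regex motif (motif_to_regex motif)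

-- ===== LEMMAS AND PROOFS =====

-- Python str.replace with a single-character pattern is a per-character flatMap.
theorem go_single (k : Char) (new : List Char) :
    ∀ (l acc : List Char) (fuel : Nat), l.length ≤ fuel →
      PySem.Chars.replace.go [k] new fuel l acc
        = acc.reverse ++ l.flatMap (fun c => if c = k then new else [c]) := by
  intro l
  induction l with
  | nil =>
    intro acc fuel _
    cases fuel <;> simp [PySem.Chars.replace.go]
  | cons c t ih =>
    intro acc fuel hf
    cases fuel with
    | zero => simp at hf
    | succ f =>
      by_cases hc : c = k
      · subst hc
        simp only [PySem.Chars.replace.go, List.isPrefixOf, BEq.rfl, Bool.true_and, if_true]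
        rw [show List.drop [c].length (c :: t) = t from rfl,
          ih _ f (by simpa using hf)]
        simp
      · have : ([k].isPrefixOf (c :: t)) = false := by
          simp [List.isPrefixOf]; exact fun h => absurd h.symm hc
        simp only [PySem.Chars.replace.go, this]
        rw [ih _ f (by simpa using hf)]
        simp [hc]

theorem replace_single (s : List Char) (k : Char) (new : List Char) :
    PySem.Chars.replace s [k] new = s.flatMap (fun c => if c = k then new else [c]) := by
  rw [PySem.Chars.replace, if_neg (by simp)]
  rw [go_single k new s [] s.length (le_refl _)]
  simp

-- joining with the empty separator is flatten
theorem join_nil_flatten (L : List (List Char)) :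
    PySem.Chars.join [] L = L.flatten := by
  induction L with
  | nil => simp [PySem.Chars.join_nil]
  | cons a t ih =>
    cases t with
    | nil => simp [PySem.Chars.join_singleton]
    | cons b u => rw [PySem.Chars.join_cons_cons, ih]; simp

-- B's accumulator loop builds the map of expand over the characters
theorem foldl_append_map (l : List Char) :
    ∀ acc : List String,
      l.foldl (fun out c => out ++ [pvExpand c]) acc = acc ++ l.map pvExpand := by
  induction l with
  | nil => intro acc; simp
  | cons c t ih => intro acc; simp [ih]

-- the per-character value of A's twelve-stage replacement pipeline equals B's expand(c)
theorem point (c : Char) :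
    List.flatMap (fun x => if x = 'U' then "[UT]".toList else [x])
      (List.flatMap (fun x => if x = 'N' then "[ATCG]".toList else [x])
        (List.flatMap (fun x => if x = 'V' then "[ACG]".toList else [x])
          (List.flatMap (fun x => if x = 'H' then "[ACT]".toList else [x])
            (List.flatMap (fun x => if x = 'D' then "[AGT]".toList else [x])
              (List.flatMap (fun x => if x = 'B' then "[CGT]".toList else [x])
                (List.flatMap (fun x => if x = 'M' then "[AC]".toList else [x])
                  (List.flatMap (fun x => if x = 'K' then "[GT]".toList else [x])
                    (List.flatMap (fun x => if x = 'W' then "[AT]".toList else [x])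
                      (List.flatMap (fun x => if x = 'S' then "[GC]".toList else [x])
                        (List.flatMap (fun x => if x = 'R' then "[AG]".toList else [x])
                          (List.flatMap (fun x => if x = 'Y' then "[CT]".toList else [x])
                            [c])))))))))))
      = (pvExpand c).toList := by
  by_cases hY : c = 'Y'; · subst hY; decide
  by_cases hR : c = 'R'; · subst hR; decide
  by_cases hS : c = 'S'; · subst hS; decide
  by_cases hW : c = 'W'; · subst hW; decide
  by_cases hK : c = 'K'; · subst hK; decide
  by_cases hM : c = 'M'; · subst hM; decide
  by_cases hB : c = 'B'; · subst hB; decide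
  by_cases hD : c = 'D'; · subst hD; decide
  by_cases hH : c = 'H'; · subst hH; decide
  by_cases hV : c = 'V'; · subst hV; decide
  by_cases hN : c = 'N'; · subst hN; decide
  by_cases hU : c = 'U'; · subst hU; decide
  simp [hY, hR, hS, hW, hK, hM, hB, hD, hH, hV, hN, hU, pvExpand]

-- A's full twelve-stage pipeline over any character list is B's single flatMap of expand
theorem pipeline (l : List Char) :
    List.flatMap (fun x => if x = 'U' then "[UT]".toList else [x])
      (List.flatMap (fun x => if x = 'N' then "[ATCG]".toList else [x])
        (List.flatMap (fun x => if x = 'V' then "[ACG]".toList else [x])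
          (List.flatMap (fun x => if x = 'H' then "[ACT]".toList else [x])
            (List.flatMap (fun x => if x = 'D' then "[AGT]".toList else [x])
              (List.flatMap (fun x => if x = 'B' then "[CGT]".toList else [x])
                (List.flatMap (fun x => if x = 'M' then "[AC]".toList else [x])
                  (List.flatMap (fun x => if x = 'K' then "[GT]".toList else [x])
                    (List.flatMap (fun x => if x = 'W' then "[AT]".toList else [x])
                      (List.flatMap (fun x => if x = 'S' then "[GC]".toList else [x])
                        (List.flatMap (fun x => if x = 'R' then "[AG]".toList else [x])
                          (List.flatMap (fun x => if x = 'Y' then "[CT]".toList else [x])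
                            l)))))))))))
      = l.flatMap (fun c => (pvExpand c).toList) := by
  induction l with
  | nil => simp
  | cons c t ih =>
    have hpoint := point c
    simp only [List.flatMap_cons, List.flatMap_nil, List.append_nil] at hpoint
    simp only [List.flatMap_cons, List.flatMap_append, ih, hpoint]

-- ===== VERDICT (by name: the statement is the Claim_ definition above) =====
theorem motif_to_regex_spec : Claim_equal_motif_to_regex := by
  intro motif _
  unfold Spec_motif_to_regex motif_to_regex motif_to_regex_alt
  have hitems : iupacDictA.items =
      [("Y", "[CT]"), ("R", "[AG]"), ("S", "[GC]"), ("W", "[AT]"), ("K", "[GT]"), ("M", "[AC]"),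
       ("B", "[CGT]"), ("D", "[AGT]"), ("H", "[ACT]"), ("V", "[ACG]"), ("N", "[ATCG]"), ("U", "[UT]")] := by
    decide
  rw [hitems]
  simp only [List.foldl_cons, List.foldl_nil]
  rw [foldl_append_map, List.nil_append]
  rw [String.ext_iff]
  simp only [PySem.Str.toList_replace, PySem.Str.toList_join]
  have tY : "Y".toList = ['Y'] := by decide
  have tR : "R".toList = ['R'] := by decide
  have tS : "S".toList = ['S'] := by decide
  have tW : "W".toList = ['W'] := by decide
  have tK : "K".toList = ['K'] := by decide
  have tM : "M".toList = ['M'] := by decide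
  have tB : "B".toList = ['B'] := by decide
  have tD : "D".toList = ['D'] := by decide
  have tH : "H".toList = ['H'] := by decide
  have tV : "V".toList = ['V'] := by decide
  have tN : "N".toList = ['N'] := by decide
  have tU : "U".toList = ['U'] := by decide
  simp only [tY, tR, tS, tW, tK, tM, tB, tD, tH, tV, tN, tU]
  simp only [replace_single]
  rw [pipeline]
  rw [show ("" : String).toList = [] from rfl, join_nil_flatten]
  rw [List.map_map]
  simp [List.flatMap_def, Function.comp_def]
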